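-- pv_equiv track=rewrite | github.com/Bhargavi2212/cloudrun-medios | Version-2-HospitalB/services/manage_agent/core/receptionist_triage.py | _map_chief_complaint_to_rfv_clusters
-- ===== SOURCE A (Python) =====
-- def _map_chief_complaint_to_rfv_clusters(
--     chief_complaint: str
-- ) -> dict[str, int]:
--     """
--     Map chief complaint text to RFV cluster features.
--     Returns a dictionary of cluster names to binary values (0 or 1).
--     """
--     complaint_lower = chief_complaint.lower()
--
--     # Default: all clusters set to 0
--     clusters = {
--         "rfv1_cluster_Neurological": 0,
--         "rfv1_cluster_Respiratory": 0,
--         "rfv1_cluster_Trauma_Injury": 0,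
--         "rfv1_cluster_Fever_Infection": 0,
--         "rfv1_cluster_Gastrointestinal": 0,
--         "rfv1_cluster_Cardiovascular": 0,
--         "rfv1_cluster_Pain": 0,
--         "rfv1_cluster_Other": 0,
--     }
--
--     # Keyword-based mapping (simple heuristic)
--     if any(
--         kw in complaint_lower
--         for kw in ["chest pain", "heart", "cardiac", "palpitation"]
--     ):
--         clusters["rfv1_cluster_Cardiovascular"] = 1
--     elif any(
--         kw in complaint_lower
--         for kw in ["breathing", "shortness of breath", "cough", "respiratory"]
--     ):
--         clusters["rfv1_cluster_Respiratory"] = 1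
--     elif any(
--         kw in complaint_lower
--         for kw in ["headache", "seizure", "dizziness", "neurological", "stroke"]
--     ):
--         clusters["rfv1_cluster_Neurological"] = 1
--     elif any(
--         kw in complaint_lower
--         for kw in ["trauma", "injury", "accident", "fall", "cut", "wound"]
--     ):
--         clusters["rfv1_cluster_Trauma_Injury"] = 1
--     elif any(kw in complaint_lower for kw in ["fever", "infection", "sick", "flu"]):
--         clusters["rfv1_cluster_Fever_Infection"] = 1
--     elif any(
--         kw in complaint_lower
--         for kw in ["stomach", "nausea", "vomiting", "diarrhea", "abdominal"]
--     ):
--         clusters["rfv1_cluster_Gastrointestinal"] = 1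
--     elif any(kw in complaint_lower for kw in ["pain", "ache", "sore"]):
--         clusters["rfv1_cluster_Pain"] = 1
--     else:
--         clusters["rfv1_cluster_Other"] = 1
--
--     return clusters
-- ===== SOURCE B (Python) =====
-- # Flat keyword->priority map reduced by minimum, instead of an if/elif chain
-- # of grouped first-match tests: every keyword is tested, the winning cluster
-- # is the one with the smallest priority among all matches.
-- _KEYWORD_PRIORITY = [
--     ("chest pain", 0), ("heart", 0), ("cardiac", 0), ("palpitation", 0),
--     ("breathing", 1), ("shortness of breath", 1), ("cough", 1), ("respiratory", 1),
--     ("headache", 2), ("seizure", 2), ("dizziness", 2), ("neurological", 2), ("stroke", 2),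
--     ("trauma", 3), ("injury", 3), ("accident", 3), ("fall", 3), ("cut", 3), ("wound", 3),
--     ("fever", 4), ("infection", 4), ("sick", 4), ("flu", 4),
--     ("stomach", 5), ("nausea", 5), ("vomiting", 5), ("diarrhea", 5), ("abdominal", 5),
--     ("pain", 6), ("ache", 6), ("sore", 6),
-- ]
--
-- _PRIORITY_NAME = [
--     "rfv1_cluster_Cardiovascular",
--     "rfv1_cluster_Respiratory",
--     "rfv1_cluster_Neurological",
--     "rfv1_cluster_Trauma_Injury",
--     "rfv1_cluster_Fever_Infection",
--     "rfv1_cluster_Gastrointestinal",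
--     "rfv1_cluster_Pain",
--     "rfv1_cluster_Other",
-- ]
--
-- _OUTPUT_ORDER = [
--     "rfv1_cluster_Neurological",
--     "rfv1_cluster_Respiratory",
--     "rfv1_cluster_Trauma_Injury",
--     "rfv1_cluster_Fever_Infection",
--     "rfv1_cluster_Gastrointestinal",
--     "rfv1_cluster_Cardiovascular",
--     "rfv1_cluster_Pain",
--     "rfv1_cluster_Other",
-- ]
--
--
-- def _map_chief_complaint_to_rfv_clusters(chief_complaint: str) -> dict[str, int]:
--     low = chief_complaint.lower()
--     best = 7
--     for kw, prio in _KEYWORD_PRIORITY: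
--         if prio < best and kw in low:
--             best = prio
--     winner = _PRIORITY_NAME[best]
--     return {name: int(name == winner) for name in _OUTPUT_ORDER}
-- ===== Notes on version B (the rewrite author's own statement) =====
-- stated objective: alternative
-- what changed: Replaces the if/elif chain of grouped any()-tests and a mutated default dict with a flat keyword->priority table reduced by a minimum over all matches (no grouping, no short-circuit), the winner then rendered as a one-hot dict comprehension.
import Mathlib
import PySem

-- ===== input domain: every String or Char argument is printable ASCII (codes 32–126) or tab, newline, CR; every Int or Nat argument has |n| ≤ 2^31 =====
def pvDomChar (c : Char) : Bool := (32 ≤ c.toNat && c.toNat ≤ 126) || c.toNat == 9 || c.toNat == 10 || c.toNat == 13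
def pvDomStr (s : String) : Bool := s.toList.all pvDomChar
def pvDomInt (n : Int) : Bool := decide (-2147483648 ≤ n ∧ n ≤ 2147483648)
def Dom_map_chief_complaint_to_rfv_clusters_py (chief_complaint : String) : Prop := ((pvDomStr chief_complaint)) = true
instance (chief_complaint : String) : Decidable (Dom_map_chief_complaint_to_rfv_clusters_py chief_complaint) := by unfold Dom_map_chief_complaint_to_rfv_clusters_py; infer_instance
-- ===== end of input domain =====

-- B replaces A's if/elif chain of grouped keyword tests by a flat keyword->priority table reduced
-- by a minimum over all matches, then rendered as a one-hot dict; objective: alternative.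

-- ===== PORT A =====
-- Literal transliteration of A: default dict of zeros, then an if/elif chain overwriting one key.
def map_chief_complaint_to_rfv_clusters_py (chief_complaint : String) : List (String × Int) :=
  let complaint_lower := PySem.Str.lower chief_complaint
  let clusters : PySem.Dict String Int :=
    PySem.Dict.ofList [("rfv1_cluster_Neurological", 0), ("rfv1_cluster_Respiratory", 0),
     ("rfv1_cluster_Trauma_Injury", 0), ("rfv1_cluster_Fever_Infection", 0),
     ("rfv1_cluster_Gastrointestinal", 0), ("rfv1_cluster_Cardiovascular", 0),
     ("rfv1_cluster_Pain", 0), ("rfv1_cluster_Other", 0)]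
  if ["chest pain", "heart", "cardiac", "palpitation"].any (fun kw => PySem.Str.isIn kw complaint_lower) then
    (clusters.insert "rfv1_cluster_Cardiovascular" 1).items
  else if ["breathing", "shortness of breath", "cough", "respiratory"].any (fun kw => PySem.Str.isIn kw complaint_lower) then
    (clusters.insert "rfv1_cluster_Respiratory" 1).items
  else if ["headache", "seizure", "dizziness", "neurological", "stroke"].any (fun kw => PySem.Str.isIn kw complaint_lower) then
    (clusters.insert "rfv1_cluster_Neurological" 1).items
  else if ["trauma", "injury", "accident", "fall", "cut", "wound"].any (fun kw => PySem.Str.isIn kw complaint_lower) then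
    (clusters.insert "rfv1_cluster_Trauma_Injury" 1).items
  else if ["fever", "infection", "sick", "flu"].any (fun kw => PySem.Str.isIn kw complaint_lower) then
    (clusters.insert "rfv1_cluster_Fever_Infection" 1).items
  else if ["stomach", "nausea", "vomiting", "diarrhea", "abdominal"].any (fun kw => PySem.Str.isIn kw complaint_lower) then
    (clusters.insert "rfv1_cluster_Gastrointestinal" 1).items
  else if ["pain", "ache", "sore"].any (fun kw => PySem.Str.isIn kw complaint_lower) then
    (clusters.insert "rfv1_cluster_Pain" 1).items
  else
    (clusters.insert "rfv1_cluster_Other" 1).items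

-- ===== PORT B =====
-- B's flat keyword -> priority table, a single literal list (Source B's _KEYWORD_PRIORITY).
def rfvKeywordPriority : List (String × Nat) :=
  [("chest pain", 0), ("heart", 0), ("cardiac", 0), ("palpitation", 0),
   ("breathing", 1), ("shortness of breath", 1), ("cough", 1), ("respiratory", 1),
   ("headache", 2), ("seizure", 2), ("dizziness", 2), ("neurological", 2), ("stroke", 2),
   ("trauma", 3), ("injury", 3), ("accident", 3), ("fall", 3), ("cut", 3), ("wound", 3),
   ("fever", 4), ("infection", 4), ("sick", 4), ("flu", 4),
   ("stomach", 5), ("nausea", 5), ("vomiting", 5), ("diarrhea", 5), ("abdominal", 5),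
   ("pain", 6), ("ache", 6), ("sore", 6)]

def rfvPriorityName : List String :=
  ["rfv1_cluster_Cardiovascular", "rfv1_cluster_Respiratory", "rfv1_cluster_Neurological",
   "rfv1_cluster_Trauma_Injury", "rfv1_cluster_Fever_Infection", "rfv1_cluster_Gastrointestinal",
   "rfv1_cluster_Pain", "rfv1_cluster_Other"]

def rfvOutputOrder : List String :=
  ["rfv1_cluster_Neurological", "rfv1_cluster_Respiratory", "rfv1_cluster_Trauma_Injury",
   "rfv1_cluster_Fever_Infection", "rfv1_cluster_Gastrointestinal", "rfv1_cluster_Cardiovascular",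
   "rfv1_cluster_Pain", "rfv1_cluster_Other"]

-- Source B's loop `for kw, prio in _KEYWORD_PRIORITY: if prio < best and kw in low: best = prio`
-- as a fold; the index `_PRIORITY_NAME[best]` is always in range (best ≤ 7), ported with getD.
def map_chief_complaint_to_rfv_clusters_py_alt (chief_complaint : String) : List (String × Int) :=
  let low := PySem.Str.lower chief_complaint
  let best := rfvKeywordPriority.foldl
    (fun best kp => if kp.2 < best && PySem.Str.isIn kp.1 low then kp.2 else best) 7
  let winner := rfvPriorityName.getD best ""
  rfvOutputOrder.map (fun name => (name, if name == winner then (1 : Int) else 0))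

-- ===== PRECONDITION & SPEC =====
def Spec_map_chief_complaint_to_rfv_clusters_py (chief_complaint : String) (out : List (String × Int)) : Prop := out = map_chief_complaint_to_rfv_clusters_py_alt chief_complaint
instance (chief_complaint : String) (out : List (String × Int)) : Decidable (Spec_map_chief_complaint_to_rfv_clusters_py chief_complaint out) := by unfold Spec_map_chief_complaint_to_rfv_clusters_py; infer_instance

-- ===== CLAIM (what is proved, stated in full; the proofs are below) =====
def Claim_equal_map_chief_complaint_to_rfv_clusters_py : Prop := ∀ (chief_complaint : String), Dom_map_chief_complaint_to_rfv_clusters_py chief_complaint → Spec_map_chief_complaint_to_rfv_clusters_py chief_complaint (map_chief_complaint_to_rfv_clusters_py chief_complaint)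

-- ===== LEMMAS AND PROOFS =====

-- Folding B's step over one priority group (all keywords share priority p) either lowers the
-- accumulator to min b p (some keyword matches) or leaves it (none does).
theorem rfv_foldl_group (low : String) (p : Nat) (kws : List String) (b : Nat) :
    (kws.map (fun kw => (kw, p))).foldl
      (fun best kp => if kp.2 < best && PySem.Str.isIn kp.1 low then kp.2 else best) b
    = if kws.any (fun kw => PySem.Str.isIn kw low) then min b p else b := by
  induction kws generalizing b with
  | nil => simp
  | cons kw rest ih =>
    rw [List.map_cons, List.foldl_cons]
    by_cases hin : PySem.Str.isIn kw low = true
    · by_cases hlt : p < b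
      · rw [if_pos (by simp only [Bool.and_eq_true, decide_eq_true_eq]; exact ⟨hlt, hin⟩), ih]
        simp only [List.any_cons, hin, Bool.true_or, if_true, Nat.min_def]
        split_ifs <;> omega
      · rw [if_neg (by simp only [Bool.and_eq_true, decide_eq_true_eq]; exact fun h => hlt h.1), ih]
        simp only [List.any_cons, hin, Bool.true_or, if_true, Nat.min_def]
        split_ifs <;> omega
    · rw [if_neg (by simp only [Bool.and_eq_true, decide_eq_true_eq]; exact fun h => hin h.2), ih]
      simp only [List.any_cons, Bool.or_eq_true, hin]
      simp

-- The flat table is the concatenation of the seven priority groups.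
theorem rfvKeywordPriority_decomp :
    rfvKeywordPriority =
      (["chest pain", "heart", "cardiac", "palpitation"].map (fun kw => (kw, 0)))
      ++ (["breathing", "shortness of breath", "cough", "respiratory"].map (fun kw => (kw, 1)))
      ++ (["headache", "seizure", "dizziness", "neurological", "stroke"].map (fun kw => (kw, 2)))
      ++ (["trauma", "injury", "accident", "fall", "cut", "wound"].map (fun kw => (kw, 3)))
      ++ (["fever", "infection", "sick", "flu"].map (fun kw => (kw, 4)))
      ++ (["stomach", "nausea", "vomiting", "diarrhea", "abdominal"].map (fun kw => (kw, 5)))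
      ++ (["pain", "ache", "sore"].map (fun kw => (kw, 6))) := rfl

-- ===== VERDICT (by name: the statement is the Claim_ definition above) =====
set_option maxHeartbeats 4000000 in
theorem map_chief_complaint_to_rfv_clusters_py_spec : Claim_equal_map_chief_complaint_to_rfv_clusters_py := by
  intro cc _
  unfold Spec_map_chief_complaint_to_rfv_clusters_py
  unfold map_chief_complaint_to_rfv_clusters_py map_chief_complaint_to_rfv_clusters_py_alt
  simp only [rfvKeywordPriority_decomp, List.foldl_append, rfv_foldl_group]
  by_cases h0 : (["chest pain", "heart", "cardiac", "palpitation"].any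
      fun kw => PySem.Str.isIn kw (PySem.Str.lower cc)) = true <;>
  by_cases h1 : (["breathing", "shortness of breath", "cough", "respiratory"].any
      fun kw => PySem.Str.isIn kw (PySem.Str.lower cc)) = true <;>
  by_cases h2 : (["headache", "seizure", "dizziness", "neurological", "stroke"].any
      fun kw => PySem.Str.isIn kw (PySem.Str.lower cc)) = true <;>
  by_cases h3 : (["trauma", "injury", "accident", "fall", "cut", "wound"].any
      fun kw => PySem.Str.isIn kw (PySem.Str.lower cc)) = true <;>
  by_cases h4 : (["fever", "infection", "sick", "flu"].any
      fun kw => PySem.Str.isIn kw (PySem.Str.lower cc)) = true <;>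
  by_cases h5 : (["stomach", "nausea", "vomiting", "diarrhea", "abdominal"].any
      fun kw => PySem.Str.isIn kw (PySem.Str.lower cc)) = true <;>
  by_cases h6 : (["pain", "ache", "sore"].any
      fun kw => PySem.Str.isIn kw (PySem.Str.lower cc)) = true <;>
  simp only [h0, h1, h2, h3, h4, h5, h6] <;> decide
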